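-- pv_equiv track=rewrite | github.com/KexarGomez-20/Analisis-de-Algoritmos-IL355 | Proyecto Final/SRC/PROYECTO FINAL.py | build_knn_graph
-- ===== SOURCE A (Python) =====
-- from typing import Optional, Tuple, List, Dict, Generator, Set
--
-- def levenshtein(a: str, b: str) -> int:
--     if a == b:
--         return 0
--     la, lb = len(a), len(b)
--     if la == 0:
--         return lb
--     if lb == 0:
--         return la
--     prev = list(range(lb + 1))
--     cur = [0] * (lb + 1)
--     for i in range(1, la + 1):
--         cur[0] = i
--         ai = a[i - 1]
--         for j in range(1, lb + 1):
--             cost = 0 if ai == b[j - 1] else 1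
--             cur[j] = min(prev[j] + 1, cur[j - 1] + 1, prev[j - 1] + cost)
--         prev, cur = cur, prev
--     return prev[lb]
--
-- def build_knn_graph(words: List[str], k: int = 8) -> Dict[int, List[Tuple[int, int]]]:
--     n = len(words)
--     adj = {i: [] for i in range(n)}
--     for i in range(n):
--         dists = []
--         for j in range(n):
--             if i == j:
--                 continue
--             d = levenshtein(words[i], words[j])
--             dists.append((d, j))
--         dists.sort(key=lambda x: x[0])
--         for d, j in dists[:k]:
--             adj[i].append((j, d))
--     return adj
-- ===== SOURCE B (Python) =====
-- def levenshtein(a: str, b: str) -> int: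
--     if a == b:
--         return 0
--     la, lb = len(a), len(b)
--     if la == 0:
--         return lb
--     if lb == 0:
--         return la
--     prev = list(range(lb + 1))
--     cur = [0] * (lb + 1)
--     for i in range(1, la + 1):
--         cur[0] = i
--         ai = a[i - 1]
--         for j in range(1, lb + 1):
--             cost = 0 if ai == b[j - 1] else 1
--             cur[j] = min(prev[j] + 1, cur[j - 1] + 1, prev[j - 1] + cost)
--         prev, cur = cur, prev
--     return prev[lb]
--
--
-- def build_knn_graph(words, k=8):
--     # Distances: each unordered pair computed ONCE (upper triangle, Levenshtein
--     # is symmetric); top[i][j-i-1] = d(words[i], words[j]) for j > i.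
--     n = len(words)
--     top = [[levenshtein(words[i], words[j]) for j in range(i + 1, n)]
--            for i in range(n)]
--
--     def dget(i, j):
--         return top[i][j - i - 1] if i < j else top[j][i - j - 1]
--
--     # Selection: NO sort. Each node keeps an ordered buffer of at most k
--     # (distance, j) pairs; every candidate is placed after equal distances
--     # (so ties keep ascending-j order) and the buffer is trimmed to k.
--     adj = {}
--     for i in range(n):
--         best = []
--         for j in range(n):
--             if j == i:
--                 continue
--             d = dget(i, j)
--             pos = len(best)
--             while pos > 0 and best[pos - 1][0] > d:
--                 pos -= 1
--             best.insert(pos, (d, j))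
--             if len(best) > k:
--                 best.pop()
--         adj[i] = [(j, d) for d, j in best]
--     return adj
-- ===== Notes on version B (the rewrite author's own statement) =====
-- stated objective: alternative
-- what changed: B replaces A's per-node 'collect all n-1 distances, Timsort, slice [:k]' by a single-pass bounded selection: each node keeps an ordered buffer of at most k (distance, j) pairs, placing each candidate after equal distances and trimming the buffer, so the full candidate list is never materialized or sorted; distances come from an upper-triangle table that computes each unordered pair once via Levenshtein symmetry.
-- intended difference: For k < 0 with at least 2 - k words, A's slice dists[:k] accidentally returns all but the last |k| sorted neighbours per node, while B's bounded buffer keeps none; 'at most k nearest' with negative k should yield no neighbours, which is B's value. — e.g. on build_knn_graph(["a", "b", "c"], -1): A returns [(0, [(1, 1)]), (1, [(0, 1)]), (2, [(0, 1)])], B returns [(0, []), (1, []), (2, [])]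
import Mathlib
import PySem

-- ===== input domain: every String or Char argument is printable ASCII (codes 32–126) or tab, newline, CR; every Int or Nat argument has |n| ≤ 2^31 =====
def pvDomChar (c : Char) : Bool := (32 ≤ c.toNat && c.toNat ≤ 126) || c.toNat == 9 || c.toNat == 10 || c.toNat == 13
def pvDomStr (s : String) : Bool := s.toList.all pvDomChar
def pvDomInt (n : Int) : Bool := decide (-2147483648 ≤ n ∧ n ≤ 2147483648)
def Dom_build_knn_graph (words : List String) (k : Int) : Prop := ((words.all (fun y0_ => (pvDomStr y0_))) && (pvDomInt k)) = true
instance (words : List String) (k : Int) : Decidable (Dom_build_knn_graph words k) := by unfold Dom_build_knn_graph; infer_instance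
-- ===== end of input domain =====

-- B computes each Levenshtein distance once per unordered pair (upper triangle, using the proved symmetry
-- d(a,b)=d(b,a)) and replaces A's per-node sort-and-slice by a single-pass bounded insertion buffer of at
-- most k nearest neighbours (objective: alternative); for negative k, B's buffer is naturally empty — see D_.


-- ===== PORT A =====
-- literal port of the two-row DP levenshtein; all list/string indices are in range, so getD/set are exact
def levenshtein (a b : String) : Int :=
  if a == b then 0
  else
    let al := a.toList
    let bl := b.toList
    let la := al.length
    let lb := bl.length
    if la == 0 then (lb : Int)
    else if lb == 0 then (la : Int)
    else
      let prev : List Int := (List.range (lb + 1)).map (fun (j : Nat) => (j : Int))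
      let cur : List Int := List.replicate (lb + 1) 0
      let pc := (List.range' 1 la).foldl (fun (pc : List Int × List Int) (i : Nat) =>
        let cur1 := pc.2.set 0 (i : Int)
        let ai := al.getD (i - 1) ' '
        let cur2 := (List.range' 1 lb).foldl (fun cur j =>
          let cost : Int := if ai = bl.getD (j - 1) ' ' then 0 else 1
          cur.set j (min (min (pc.1.getD j 0 + 1) (cur.getD (j - 1) 0 + 1))
                         (pc.1.getD (j - 1) 0 + cost))) cur1
        (cur2, pc.1)) (prev, cur)
      pc.1.getD lb 0

def build_knn_graph (words : List String) (k : Int) : List (Int × List (Int × Int)) :=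
  let n : Int := PySem.List.len words
  let adj0 : PySem.Dict Int (List (Int × Int)) :=
    (PySem.List.pyRange 0 n 1).foldl (fun d i => d.insert i []) PySem.Dict.empty
  let adj :=
    (PySem.List.pyRange 0 n 1).foldl (fun adj i =>
      let dists : List (Int × Int) :=
        (PySem.List.pyRange 0 n 1).foldl (fun dists j =>
          if i == j then dists
          else dists ++ [(levenshtein (PySem.List.pyGetD words i "") (PySem.List.pyGetD words j ""), j)]) []
      let dists := PySem.List.sorted dists (fun x => x.1) false
      (PySem.List.slice dists none (some k)).foldl (fun adj dj =>
        adj.modify i [] (fun l => l ++ [(dj.2, dj.1)])) adj) adj0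
  adj.items

-- ===== PORT B =====
-- upper-triangle distance table: top[i][j-i-1] = levenshtein words[i] words[j] for j > i
def pvTop (words : List String) : List (List Int) :=
  (List.range words.length).map (fun i =>
    (List.range' (i + 1) (words.length - (i + 1))).map (fun j =>
      levenshtein (words.getD i "") (words.getD j "")))

def pvDget (top : List (List Int)) (i j : Nat) : Int :=
  if i < j then (top.getD i []).getD (j - i - 1) 0 else (top.getD j []).getD (i - j - 1) 0

-- the 'while pos > 0 and best[pos-1][0] > d: pos -= 1' scan, as recursion on pos
def pvScanPos (best : List (Int × Int)) (d : Int) : Nat → Nat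
  | 0 => 0
  | (p+1) => if d < (best.getD p (0, 0)).1 then pvScanPos best d p else p + 1

-- one candidate: insert at the scanned position, then trim the buffer back to k ('best.pop()')
def pvStep (k : Int) (best : List (Int × Int)) (x : Int × Int) : List (Int × Int) :=
  let b2 := PySem.List.insert best ((pvScanPos best x.1 best.length : Nat) : Int) x
  if (b2.length : Int) > k then b2.dropLast else b2

def pvRowB (top : List (List Int)) (n : Nat) (k : Int) (i : Nat) : List (Int × Int) :=
  ((List.range n).foldl (fun best j =>
      if j == i then best else pvStep k best (pvDget top i j, (j : Int))) []).map
    (fun t => (t.2, t.1))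

def build_knn_graph_alt (words : List String) (k : Int) : List (Int × List (Int × Int)) :=
  let n := words.length
  let top := pvTop words
  (List.range n).map (fun (i : Nat) => ((i : Int), pvRowB top n k i))

-- ===== PRECONDITION & SPEC =====
-- For k < 0 on a list with at least 2 - k words, A's slice dists[:k] accidentally returns all but the
-- last |k| sorted neighbours, while B's bounded buffer naturally keeps none: 'at most k nearest' with
-- negative k should be no neighbours at all, which is B's value.
def D_build_knn_graph (words : List String) (k : Int) : Prop := k < 0 ∧ 2 ≤ (words.length : Int) + k
instance (words : List String) (k : Int) : Decidable (D_build_knn_graph words k) := by unfold D_build_knn_graph; infer_instance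

def Spec_build_knn_graph (words : List String) (k : Int) (out : List (Int × List (Int × Int))) : Prop := ¬ D_build_knn_graph words k → out = build_knn_graph_alt words k
instance (words : List String) (k : Int) (out : List (Int × List (Int × Int))) : Decidable (Spec_build_knn_graph words k out) := by unfold Spec_build_knn_graph; infer_instance

def pvDiffWitness_build_knn_graph : List String × Int := (["a", "b", "c"], -1)
def pvDiffWitnessOut_build_knn_graph : (List (Int × List (Int × Int))) × (List (Int × List (Int × Int))) :=
  ([(0, [(1, 1)]), (1, [(0, 1)]), (2, [(0, 1)])], [(0, []), (1, []), (2, [])])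

-- ===== CLAIM (what is proved, stated in full; the proofs are below) =====
def Claim_unchanged_build_knn_graph : Prop := ∀ (words : List String) (k : Int), Dom_build_knn_graph words k → Spec_build_knn_graph words k (build_knn_graph words k)
def Claim_changed_build_knn_graph : Prop := Dom_build_knn_graph (pvDiffWitness_build_knn_graph.1) (pvDiffWitness_build_knn_graph.2) ∧ D_build_knn_graph (pvDiffWitness_build_knn_graph.1) (pvDiffWitness_build_knn_graph.2) ∧ build_knn_graph (pvDiffWitness_build_knn_graph.1) (pvDiffWitness_build_knn_graph.2) = pvDiffWitnessOut_build_knn_graph.1 ∧ build_knn_graph_alt (pvDiffWitness_build_knn_graph.1) (pvDiffWitness_build_knn_graph.2) = pvDiffWitnessOut_build_knn_graph.2 ∧ pvDiffWitnessOut_build_knn_graph.1 ≠ pvDiffWitnessOut_build_knn_graph.2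
def Claim_exact_build_knn_graph : Prop := ∀ (words : List String) (k : Int), Dom_build_knn_graph words k → D_build_knn_graph words k → build_knn_graph words k ≠ build_knn_graph_alt words k

-- ===== LEMMAS AND PROOFS =====

def levTab (al bl : List Char) : Nat → Nat → Int
  | 0, j => (j : Int)
  | (i+1), 0 => ((i : Int) + 1)
  | (i+1), (j+1) =>
      min (min (levTab al bl i (j+1) + 1) (levTab al bl (i+1) j + 1))
          (levTab al bl i j + if al.getD i ' ' = bl.getD j ' ' then 0 else 1)

theorem levTab_symm (al bl : List Char) (i j : Nat) : levTab al bl i j = levTab bl al j i := by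
  fun_induction levTab al bl i j with
  | case1 j => cases j <;> simp [levTab]
  | case2 i => simp [levTab]
  | case3 i j ih1 ih2 ih3 =>
      simp only [levTab]
      rw [ih1, ih2, ih3]
      have hc : ∀ x y : Char, (if x = y then (0:Int) else 1) = (if y = x then 0 else 1) := by
        intro x y
        by_cases h : x = y
        · simp [h]
        · simp [h, eq_comm]
      rw [hc, min_comm (levTab bl al (j+1) i + 1)]

def innerStep (al bl : List Char) (prev : List Int) (i : Nat) (cur : List Int) (j : Nat) : List Int :=
  cur.set j (min (min (prev.getD j 0 + 1) (cur.getD (j-1) 0 + 1))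
    (prev.getD (j-1) 0 + if al.getD (i-1) ' ' = bl.getD (j-1) ' ' then (0:Int) else 1))

theorem lev_inner_loop (al bl : List Char) (i : Nat) (hi : 1 ≤ i) (prev cur : List Int)
    (hp : ∀ j ≤ bl.length, prev.getD j 0 = levTab al bl (i-1) j)
    (hcl : cur.length = bl.length + 1)
    (hc0 : cur.getD 0 0 = levTab al bl i 0)
    (m : Nat) (hm : m ≤ bl.length) :
    ((List.range' 1 m).foldl (innerStep al bl prev i) cur).length = bl.length + 1
    ∧ ∀ j ≤ m, ((List.range' 1 m).foldl (innerStep al bl prev i) cur).getD j 0 = levTab al bl i j := by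
  induction m with
  | zero =>
      refine ⟨by simpa using hcl, ?_⟩
      intro j hj
      interval_cases j
      simpa using hc0
  | succ m ih =>
      obtain ⟨ihl, ihv⟩ := ih (by omega)
      rw [List.range'_1_concat, List.foldl_append]
      simp only [List.foldl_cons, List.foldl_nil]
      refine ⟨by simpa [innerStep] using ihl, ?_⟩
      intro j hj
      generalize hR : (List.range' 1 m).foldl (innerStep al bl prev i) cur = R
      rw [hR] at ihl ihv
      have hlt : m + 1 < R.length := by omega
      rw [show (1:Nat) + m = m + 1 by omega]
      simp only [innerStep, show m + 1 - 1 = m from rfl]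
      by_cases hje : j = m + 1
      · subst hje
        have hset : ∀ (l : List Int) (v : Int), m + 1 < l.length → (l.set (m+1) v).getD (m+1) 0 = v := by
          intro l v h; simp [List.getD, h]
        rw [hset _ _ hlt]
        obtain ⟨i', rfl⟩ : ∃ i', i = i' + 1 := ⟨i - 1, by omega⟩
        simp only [Nat.add_sub_cancel]
        rw [hp (m+1) (by omega), hp m (by omega), ihv m (le_refl m)]
        simp only [levTab, Nat.add_sub_cancel]
      · have hjm : j ≤ m := by omega
        rw [List.getD_eq_getElem?_getD, List.getElem?_set_ne (by omega)]
        rw [← List.getD_eq_getElem?_getD]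
        exact ihv j hjm

def outerStep (al bl : List Char) (pc : List Int × List Int) (i : Nat) : List Int × List Int :=
  ((List.range' 1 bl.length).foldl (innerStep al bl pc.1 i) (pc.2.set 0 (i : Int)), pc.1)

theorem lev_outer_loop (al bl : List Char) (t : Nat) :
    ((List.range' 1 t).foldl (outerStep al bl)
        ((List.range (bl.length+1)).map (fun (j : Nat) => (j:Int)), List.replicate (bl.length+1) 0)).1.length = bl.length + 1
    ∧ ((List.range' 1 t).foldl (outerStep al bl)
        ((List.range (bl.length+1)).map (fun (j : Nat) => (j:Int)), List.replicate (bl.length+1) 0)).2.length = bl.length + 1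
    ∧ ∀ j ≤ bl.length, ((List.range' 1 t).foldl (outerStep al bl)
        ((List.range (bl.length+1)).map (fun (j : Nat) => (j:Int)), List.replicate (bl.length+1) 0)).1.getD j 0
        = levTab al bl t j := by
  induction t with
  | zero =>
      simp only [List.range'_zero, List.foldl_nil]
      refine ⟨by simp, by simp, ?_⟩
      intro j hj
      have hj' : j < bl.length + 1 := by omega
      rw [List.getD_eq_getElem?_getD, List.getElem?_map, List.getElem?_range hj']
      simp [levTab]
  | succ t ih =>
      obtain ⟨ihl1, ihl2, ihv⟩ := ih
      rw [List.range'_1_concat, List.foldl_append]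
      simp only [List.foldl_cons, List.foldl_nil]
      generalize hS : (List.range' 1 t).foldl (outerStep al bl)
        ((List.range (bl.length+1)).map (fun (j : Nat) => (j:Int)), List.replicate (bl.length+1) 0) = S
      rw [hS] at ihl1 ihl2 ihv
      have h1t : 1 + t = t + 1 := by omega
      rw [h1t]
      have hin := lev_inner_loop al bl (t+1) (by omega) S.1 (S.2.set 0 ((t+1 : Nat) : Int))
        (by intro j hj; simpa using ihv j hj)
        (by simpa using ihl2)
        (by
          have h0 : (0:Nat) < S.2.length := by omega
          have : ((S.2.set 0 ((t+1 : Nat) : Int))).getD 0 0 = ((t+1 : Nat) : Int) := by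
            simp [List.getD, h0]
          rw [this]
          simp [levTab])
        bl.length (le_refl _)
      exact ⟨hin.1, ihl1, hin.2⟩

theorem levenshtein_eq_levTab (a b : String) (hne : ¬ a = b)
    (ha : a.toList.length ≠ 0) (hb : b.toList.length ≠ 0) :
    levenshtein a b = levTab a.toList b.toList a.toList.length b.toList.length := by
  unfold levenshtein
  simp only [beq_iff_eq, hne, if_false, ha, hb]
  have hbr : ((List.range' 1 a.toList.length).foldl (fun (pc : List Int × List Int) (i : Nat) =>
        let cur1 := pc.2.set 0 (i : Int)
        let ai := a.toList.getD (i - 1) ' '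
        let cur2 := (List.range' 1 b.toList.length).foldl (fun cur j =>
          let cost : Int := if ai = b.toList.getD (j - 1) ' ' then 0 else 1
          cur.set j (min (min (pc.1.getD j 0 + 1) (cur.getD (j - 1) 0 + 1))
                         (pc.1.getD (j - 1) 0 + cost))) cur1
        (cur2, pc.1))
        ((List.range (b.toList.length + 1)).map (fun (j : Nat) => (j : Int)),
          List.replicate (b.toList.length + 1) 0))
      = ((List.range' 1 a.toList.length).foldl (outerStep a.toList b.toList)
        ((List.range (b.toList.length+1)).map (fun (j : Nat) => (j:Int)),
          List.replicate (b.toList.length+1) 0)) := rfl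
  rw [hbr]
  exact (lev_outer_loop a.toList b.toList a.toList.length).2.2 b.toList.length (le_refl _)

theorem levenshtein_symm (a b : String) : levenshtein a b = levenshtein b a := by
  by_cases hab : a = b
  · subst hab; rfl
  · have hba : ¬ b = a := fun h => hab h.symm
    by_cases ha : a.toList.length = 0
    · have hb : b.toList.length ≠ 0 := by
        intro h
        apply hab
        have h1 : a.toList = [] := List.eq_nil_of_length_eq_zero ha
        have h2 : b.toList = [] := List.eq_nil_of_length_eq_zero h
        have := h1.trans h2.symm
        exact String.toList_inj.mp this
      unfold levenshtein
      simp [hab, hba, ha]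
    · by_cases hb : b.toList.length = 0
      · unfold levenshtein
        simp [hab, hba, hb]
        intro h
        subst h
        simp at ha
      · rw [levenshtein_eq_levTab a b hab ha hb, levenshtein_eq_levTab b a hba hb ha,
            levTab_symm]

def distsA (words : List String) (i : Int) : List (Int × Int) :=
  (PySem.List.pyRange 0 (PySem.List.len words) 1).foldl (fun dists j =>
    if i == j then dists
    else dists ++ [(levenshtein (PySem.List.pyGetD words i "") (PySem.List.pyGetD words j ""), j)]) []

def rowA (words : List String) (k : Int) (i : Int) : List (Int × Int) :=
  (PySem.List.slice (PySem.List.sorted (distsA words i) (fun x => x.1) false) none (some k)).map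
    (fun dj => (dj.2, dj.1))

def stepA (words : List String) (k : Int) (adj : PySem.Dict Int (List (Int × Int))) (i : Int) :
    PySem.Dict Int (List (Int × Int)) :=
  (PySem.List.slice (PySem.List.sorted (distsA words i) (fun x => x.1) false) none (some k)).foldl
    (fun adj dj => adj.modify i [] (fun l => l ++ [(dj.2, dj.1)])) adj

theorem build_eq_fold (words : List String) (k : Int) :
    build_knn_graph words k =
      ((PySem.List.pyRange 0 (PySem.List.len words) 1).foldl (stepA words k)
        ((PySem.List.pyRange 0 (PySem.List.len words) 1).foldl (fun d i => d.insert i [])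
          PySem.Dict.empty)).items := rfl

theorem update_self {α : Type} [BEq α] [LawfulBEq α] (s : PySem.Set α) (l : List α)
    (h : ∀ x ∈ l, x ∈ s) : PySem.Set.update s l = s := by
  induction l generalizing s with
  | nil => rfl
  | cons x l ih =>
      rw [PySem.Set.update.eq_def] at *
      simp only [List.foldl_cons]
      have hx : PySem.Set.add s x = s := by
        simp [PySem.Set.add, h x (by simp)]
      rw [hx]
      exact ih s (fun y hy => h y (by simp [hy]))

theorem stepA_getD (words : List String) (k : Int) (adj : PySem.Dict Int (List (Int × Int)))
    (i c : Int) :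
    (stepA words k adj i).getD c [] =
      if c = i then adj.getD i [] ++ rowA words k i else adj.getD c [] := by
  unfold stepA
  have hmap : (PySem.List.slice (PySem.List.sorted (distsA words i) (fun x => x.1) false) none (some k)).foldl
      (fun adj dj => adj.modify i [] (fun l => l ++ [(dj.2, dj.1)])) adj
      = (((PySem.List.slice (PySem.List.sorted (distsA words i) (fun x => x.1) false) none (some k)).map
          (fun dj => ((i : Int), (dj.2, dj.1)))).foldl
            (fun d p => d.modify p.1 [] (fun x => x ++ [p.2])) adj) := by
    rw [List.foldl_map]
  rw [hmap, PySem.Dict.getD_foldl_modify_append]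
  by_cases hc : c = i
  · subst hc
    simp [List.filter_map, Function.comp_def, rowA, List.map_map]
  · have hnil : List.filter (fun p : Int × (Int × Int) => p.1 == c)
        ((PySem.List.slice (PySem.List.sorted (distsA words i) (fun x => x.1) false) none (some k)).map
          (fun dj => ((i : Int), (dj.2, dj.1)))) = [] := by
      apply List.filter_eq_nil_iff.mpr
      intro a ha
      simp only [List.mem_map] at ha
      obtain ⟨dj, _, rfl⟩ := ha
      simp only [beq_iff_eq]
      exact fun h => hc h.symm
    rw [hnil]
    simp [hc]

theorem stepA_keys (words : List String) (k : Int) (adj : PySem.Dict Int (List (Int × Int)))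
    (i : Int) (hi : i ∈ adj.keys) : (stepA words k adj i).keys = adj.keys := by
  unfold stepA
  have hmap : (PySem.List.slice (PySem.List.sorted (distsA words i) (fun x => x.1) false) none (some k)).foldl
      (fun adj dj => adj.modify i [] (fun l => l ++ [(dj.2, dj.1)])) adj
      = (((PySem.List.slice (PySem.List.sorted (distsA words i) (fun x => x.1) false) none (some k)).map
          (fun dj => ((i : Int), (dj.2, dj.1)))).foldl
            (fun d p => d.modify p.1 [] (fun x => x ++ [p.2])) adj) := by
    rw [List.foldl_map]
  rw [hmap, PySem.Dict.keys_foldl_modify_key _ Prod.fst [] (fun _ p => (fun x => x ++ [p.2]))]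
  apply update_self
  intro x hx
  simp only [List.map_map, List.mem_map] at hx
  obtain ⟨dj, _, rfl⟩ := hx
  exact hi

theorem foldA_keys (words : List String) (k : Int) (l : List Int)
    (adj : PySem.Dict Int (List (Int × Int))) (hkeys : ∀ x ∈ l, x ∈ adj.keys) :
    (l.foldl (stepA words k) adj).keys = adj.keys := by
  induction l generalizing adj with
  | nil => rfl
  | cons a l ih =>
      rw [List.foldl_cons, ih _ (fun x hx => ?_), stepA_keys _ _ _ _ (hkeys a (by simp))]
      rw [stepA_keys _ _ _ _ (hkeys a (by simp))]
      exact hkeys x (by simp [hx])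

theorem foldA_getD_notmem (words : List String) (k : Int) (l : List Int)
    (adj : PySem.Dict Int (List (Int × Int))) (c : Int) (hc : c ∉ l) :
    (l.foldl (stepA words k) adj).getD c [] = adj.getD c [] := by
  induction l generalizing adj with
  | nil => rfl
  | cons a l ih =>
      rw [List.foldl_cons, ih _ (fun h => hc (by simp [h])), stepA_getD]
      simp only [List.mem_cons, not_or] at hc
      simp [hc.1]

theorem foldA_getD_mem (words : List String) (k : Int) (l : List Int)
    (adj : PySem.Dict Int (List (Int × Int))) (hnd : l.Nodup)
    (hkeys : ∀ x ∈ l, x ∈ adj.keys) (c : Int) (hc : c ∈ l) :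
    (l.foldl (stepA words k) adj).getD c [] = adj.getD c [] ++ rowA words k c := by
  induction l generalizing adj with
  | nil => simp at hc
  | cons a l ih =>
      rw [List.foldl_cons]
      rcases List.mem_cons.mp hc with rfl | hcl
      · have hcnot : c ∉ l := (List.nodup_cons.mp hnd).1
        rw [foldA_getD_notmem _ _ _ _ _ hcnot, stepA_getD]
        simp
      · have hca : c ≠ a := fun h => (List.nodup_cons.mp hnd).1 (h ▸ hcl)
        rw [ih _ (List.nodup_cons.mp hnd).2 (fun x hx => ?_) hcl, stepA_getD]
        · simp [hca]
        · rw [stepA_keys _ _ _ _ (hkeys a (by simp))]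
          exact hkeys x (by simp [hx])

theorem nodup_castrange (n : Nat) : (((List.range n).map (fun i : Nat => (i : Int)))).Nodup := by
  refine List.Nodup.map ?_ (List.nodup_range)
  intro x y h
  simpa using h

theorem adj0_items (n : Nat) :
    (((List.range n).map (fun i : Nat => (i : Int))).foldl (fun d i => d.insert i [])
      (PySem.Dict.empty : PySem.Dict Int (List (Int × Int)))).items
    = (List.range n).map (fun i : Nat => ((i : Int), ([] : List (Int × Int)))) := by
  rw [PySem.Dict.items_foldl_insert_fresh _ (fun a => a) (fun _ => ([] : List (Int × Int))) _
    (fun a _ => by simp) (by simpa using nodup_castrange n),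
    (by rfl : (PySem.Dict.empty : PySem.Dict Int (List (Int × Int))).items = [])]
  simp [List.map_map, Function.comp_def]

theorem buildA_items (words : List String) (k : Int) :
    build_knn_graph words k
      = (List.range words.length).map (fun i : Nat => ((i : Int), rowA words k (i : Int))) := by
  rw [build_eq_fold]
  simp only [PySem.List.len_eq, PySem.List.pyRange_zero_nat]
  set L := (List.range words.length).map (fun i : Nat => (i : Int)) with hL
  set adj0 := L.foldl (fun d i => d.insert i []) (PySem.Dict.empty : PySem.Dict Int (List (Int × Int))) with hadj0
  have hitems0 : adj0.items = (List.range words.length).map (fun i : Nat => ((i : Int), ([] : List (Int × Int)))) := adj0_items _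
  have hkeys0 : adj0.keys = L := by
    show adj0.items.map Prod.fst = L
    rw [hitems0, hL, List.map_map]
    simp [Function.comp_def]
  have hnd : L.Nodup := nodup_castrange _
  have hkeys : (L.foldl (stepA words k) adj0).keys = L := by
    rw [foldA_keys _ _ _ _ (fun x hx => by rw [hkeys0]; exact hx), hkeys0]
  have hndk : (L.foldl (stepA words k) adj0).keys.Nodup := by rw [hkeys]; exact hnd
  rw [PySem.Dict.items_eq_map_keys _ hndk [], hkeys, hL, List.map_map]
  apply List.map_congr_left
  intro i hi
  simp only [Function.comp_def]
  have hmem : ((i : Nat) : Int) ∈ L := by rw [hL]; exact List.mem_map_of_mem hi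
  rw [foldA_getD_mem _ _ _ _ hnd (fun x hx => by rw [hkeys0]; exact hx) _ hmem]
  have h0 : adj0.getD (i : Int) [] = [] := by
    apply PySem.Dict.getD_of_mem_items
    · rw [hitems0]; exact List.mem_map_of_mem hi
    · rw [hkeys0]; exact hnd
  rw [h0]
  rfl

theorem pvDget_eq (words : List String) (i j : Nat) (hi : i < words.length)
    (hj : j < words.length) (hij : i ≠ j) :
    pvDget (pvTop words) i j = levenshtein (words.getD i "") (words.getD j "") := by
  have key : ∀ p q : Nat, p < words.length → q < words.length → p < q →
      ((pvTop words).getD p []).getD (q - p - 1) 0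
        = levenshtein (words.getD p "") (words.getD q "") := by
    intro p q hp hq hpq
    have htop : (pvTop words).getD p []
        = (List.range' (p + 1) (words.length - (p + 1))).map (fun j =>
            levenshtein (words.getD p "") (words.getD j "")) := by
      unfold pvTop
      rw [List.getD_eq_getElem?_getD, List.getElem?_map, List.getElem?_range hp]
      rfl
    rw [htop]
    have hlen : q - p - 1 < (List.range' (p + 1) (words.length - (p + 1))).length := by
      simp [List.length_range']; omega
    rw [List.getD_eq_getElem?_getD, List.getElem?_map, List.getElem?_eq_getElem hlen]
    simp only [Option.map_some, Option.getD_some, List.getElem_range']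
    congr 2
    omega
  unfold pvDget
  rcases Nat.lt_trichotomy i j with h | h | h
  · rw [if_pos h]
    exact key i j hi hj h
  · exact absurd h hij
  · rw [if_neg (by omega)]
    rw [key j i hj hi h]
    exact (levenshtein_symm _ _).symm

theorem distsA_eq (words : List String) (i : Nat) (hi : i < words.length) :
    distsA words (i : Int)
      = ((List.range words.length).filter (fun j => j ≠ i)).map
          (fun j => (pvDget (pvTop words) i j, (j : Int))) := by
  unfold distsA
  simp only [PySem.List.len_eq, PySem.List.pyRange_zero_nat]
  rw [List.foldl_map]
  have hbody : ∀ (acc : List (Int × Int)) (j : Nat),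
      (if ((i : Int) == (j : Int)) = true then acc
       else acc ++ [(levenshtein (PySem.List.pyGetD words (i : Int) "") (PySem.List.pyGetD words (j : Int) ""), (j : Int))])
      = (if (!((i : Int) == (j : Int))) = true
         then acc ++ [(levenshtein (PySem.List.pyGetD words (i : Int) "") (PySem.List.pyGetD words (j : Int) ""), (j : Int))]
         else acc) := by
    intro acc j
    by_cases h : ((i : Int) = (j : Int))
    · simp [h]
    · simp [h]
  simp only [hbody]
  rw [PySem.List.foldl_append_if]
  rw [List.nil_append]
  rw [List.filter_congr (l := List.range words.length)
    (q := fun j : Nat => decide (j ≠ i)) (by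
      intro j hj
      by_cases h : j = i
      · subst h; simp
      · have hcast : ¬ ((i : Int) = (j : Int)) := fun hh => h (by exact_mod_cast hh.symm)
        simp [h, hcast])]
  apply List.map_congr_left
  intro j hj
  simp only [List.mem_filter, List.mem_range, decide_eq_true_eq] at hj
  rw [PySem.List.pyGetD_natCast, PySem.List.pyGetD_natCast,
    pvDget_eq words i j hi hj.1 (fun h => hj.2 h.symm)]

-- B-side selection: the bounded buffer equals a take of the stable-sorted candidates

theorem dropWhile_head_false {α : Type} (p : α → Bool) (l : List α) (y : α) (r : List α)
    (h : l.dropWhile p = y :: r) : p y = false := by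
  induction l with
  | nil => simp at h
  | cons a l ih =>
      rw [List.dropWhile_cons] at h
      by_cases ha : p a = true
      · rw [if_pos ha] at h; exact ih h
      · rw [if_neg ha] at h
        cases h
        simpa using ha

theorem insertBy_eq_takeWhile (x : Int × Int) (s : List (Int × Int)) :
    PySem.List.insertBy (fun a b : Int × Int => decide (a.1 < b.1)) x s
      = s.takeWhile (fun y => !decide (x.1 < y.1)) ++ x :: s.dropWhile (fun y => !decide (x.1 < y.1)) := by
  induction s with
  | nil => rfl
  | cons y ys ih =>
      show (if decide (x.1 < y.1) then x :: y :: ys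
            else y :: PySem.List.insertBy (fun a b : Int × Int => decide (a.1 < b.1)) x ys) = _
      by_cases h : x.1 < y.1
      · simp [h]
      · simp only [h, decide_false, Bool.false_eq_true, if_false,
          List.takeWhile_cons, List.dropWhile_cons]
        simp only [Bool.not_false, if_true, List.cons_append]
        rw [ih]

theorem length_insertBy (x : Int × Int) (s : List (Int × Int)) :
    (PySem.List.insertBy (fun a b : Int × Int => decide (a.1 < b.1)) x s).length = s.length + 1 := by
  rw [insertBy_eq_takeWhile]
  have := List.takeWhile_append_dropWhile (p := fun y : Int × Int => !decide (x.1 < y.1)) (l := s)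
  have hlen : (s.takeWhile (fun y => !decide (x.1 < y.1))).length
      + (s.dropWhile (fun y => !decide (x.1 < y.1))).length = s.length := by
    conv_rhs => rw [← this]
    rw [List.length_append]
  simp only [List.length_append, List.length_cons]
  omega

theorem scanPos_eq (s : List (Int × Int)) (d : Int)
    (hs : s.Pairwise (fun a b => a.1 ≤ b.1)) (p : Nat)
    (hlo : (s.takeWhile (fun y => !decide (d < y.1))).length ≤ p) (hhi : p ≤ s.length) :
    pvScanPos s d p = (s.takeWhile (fun y => !decide (d < y.1))).length := by
  set t := (s.takeWhile (fun y => !decide (d < y.1))).length with ht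
  have htake : s.takeWhile (fun y => !decide (d < y.1)) = s.take t :=
    List.prefix_iff_eq_take.mp (List.takeWhile_prefix _)
  have htle : t ≤ s.length := by
    rw [ht]; exact (List.takeWhile_prefix _).length_le
  induction p with
  | zero =>
      have h0 : t = 0 := by omega
      rw [h0]
      rfl
  | succ p ih =>
      have hp : p < s.length := by omega
      show (if d < (s.getD p (0, 0)).1 then pvScanPos s d p else p + 1) = t
      have hgetD : s.getD p (0, 0) = s[p] := by
        simp [List.getD, List.getElem?_eq_getElem hp]
      by_cases hc : p + 1 = t
      · -- s[p] is inside the takeWhile prefix: not greater than d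
        have hmem : s[p] ∈ s.takeWhile (fun y => !decide (d < y.1)) := by
          rw [htake]
          have hp' : p < (s.take t).length := by
            rw [List.length_take]; omega
          have : (s.take t)[p] = s[p] := List.getElem_take
          rw [← this]
          exact List.getElem_mem hp'
        have := List.mem_takeWhile_imp hmem
        simp only [Bool.not_eq_true', decide_eq_false_iff_not] at this
        rw [hgetD, if_neg this]
        exact hc
      · -- p ≥ t: s[p] is at or past the first rejected element, hence > d
        have htp : t ≤ p := by omega
        have htlt : t < s.length := by omega
        have hdrop : s.dropWhile (fun y => !decide (d < y.1)) = s.drop t := by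
          conv_lhs => rw [← List.drop_left (l₁ := s.takeWhile (fun y => !decide (d < y.1)))
            (l₂ := s.dropWhile (fun y => !decide (d < y.1)))]
          rw [List.takeWhile_append_dropWhile, ← ht]
        have hhead : d < s[t].1 := by
          have hne : s.drop t ≠ [] := by
            intro h
            have := congrArg List.length h
            simp [List.length_drop] at this
            omega
          obtain ⟨y, r, hyr⟩ := List.exists_cons_of_ne_nil hne
          have hyt : y = s[t] := by
            have h0 : (s.drop t)[0]'(by rw [hyr]; simp) = (y :: r)[0]'(by simp) :=
              List.getElem_of_eq hyr _
            simp only [List.getElem_cons_zero] at h0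
            rw [← h0]
            simp [List.getElem_drop]
          have hfalse := dropWhile_head_false _ _ _ _ (hdrop.trans hyr)
          simp only [Bool.not_eq_false', decide_eq_true_eq] at hfalse
          rw [← hyt]
          exact hfalse
        have hmono : s[t].1 ≤ s[p].1 := by
          rcases Nat.eq_or_lt_of_le htp with rfl | hlt
          · exact le_refl _
          · exact (List.pairwise_iff_getElem.mp hs) t p htlt hp hlt
        rw [hgetD, if_pos (lt_of_lt_of_le hhead hmono)]
        exact ih (by omega) htp

-- pvStep on a key-sorted buffer is 'insertBy, then trim'
theorem pvStep_eq_insertBy (k : Int) (s : List (Int × Int)) (x : Int × Int)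
    (hs : s.Pairwise (fun a b => a.1 ≤ b.1)) :
    pvStep k s x =
      (if ((PySem.List.insertBy (fun a b : Int × Int => decide (a.1 < b.1)) x s).length : Int) > k
       then (PySem.List.insertBy (fun a b : Int × Int => decide (a.1 < b.1)) x s).dropLast
       else PySem.List.insertBy (fun a b : Int × Int => decide (a.1 < b.1)) x s) := by
  have hscan := scanPos_eq s x.1 hs s.length ((List.takeWhile_prefix _).length_le) (le_refl _)
  have htake : s.takeWhile (fun y => !decide (x.1 < y.1))
      = s.take ((s.takeWhile (fun y => !decide (x.1 < y.1))).length) :=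
    List.prefix_iff_eq_take.mp (List.takeWhile_prefix _)
  have hins : PySem.List.insert s ((pvScanPos s x.1 s.length : Nat) : Int) x
      = PySem.List.insertBy (fun a b : Int × Int => decide (a.1 < b.1)) x s := by
    rw [hscan, PySem.List.insert_natCast _ _ _ ((List.takeWhile_prefix _).length_le), insertBy_eq_takeWhile]
    congr 1
    · exact htake.symm
    · congr 1
      conv_rhs => rw [← List.drop_left (l₁ := s.takeWhile (fun y => !decide (x.1 < y.1)))
        (l₂ := s.dropWhile (fun y => !decide (x.1 < y.1)))]
      rw [List.takeWhile_append_dropWhile]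
  unfold pvStep
  rw [hins]

theorem take_insertBy (x : Int × Int) (s : List (Int × Int)) (K : Nat) :
    (PySem.List.insertBy (fun a b : Int × Int => decide (a.1 < b.1)) x s).take K
      = (PySem.List.insertBy (fun a b : Int × Int => decide (a.1 < b.1)) x (s.take K)).take K := by
  induction s generalizing K with
  | nil => simp
  | cons y ys ih =>
      show (if decide (x.1 < y.1) then x :: y :: ys
            else y :: PySem.List.insertBy (fun a b : Int × Int => decide (a.1 < b.1)) x ys).take K = _
      cases K with
      | zero => simp
      | succ K' =>
          simp only [List.take_succ_cons]
          show _ = (if decide (x.1 < y.1) then x :: y :: ys.take K'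
                    else y :: PySem.List.insertBy (fun a b : Int × Int => decide (a.1 < b.1)) x (ys.take K')).take (K' + 1)
          by_cases h : x.1 < y.1
      -- then-branch: x goes in front; the tail take collapses with take_take
          · simp only [h, decide_true, if_true, List.take_succ_cons]
            cases K' with
            | zero => simp
            | succ K'' =>
                simp only [List.take_succ_cons]
                rw [List.take_take]
                have hmin : min K'' (K'' + 1) = K'' := by omega
                rw [hmin]
          · simp only [h, decide_false, Bool.false_eq_true, if_false, List.take_succ_cons]
            rw [ih K']

-- the bounded-buffer fold over candidates = take k of the stable sort
theorem foldB_eq_take_sorted (k : Int) (hk : 0 ≤ k) (L M : List (Int × Int)) :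
    L.foldl (pvStep k) ((PySem.List.sorted M (fun x => x.1) false).take k.toNat)
      = (PySem.List.sorted (M ++ L) (fun x => x.1) false).take k.toNat := by
  induction L generalizing M with
  | nil => rw [List.append_nil]; rfl
  | cons x L ih =>
      rw [List.foldl_cons]
      have hsortM : PySem.List.sorted (M ++ [x]) (fun t : Int × Int => t.1) false
          = PySem.List.insertBy (fun a b : Int × Int => decide (a.1 < b.1)) x
              (PySem.List.sorted M (fun t => t.1) false) := by
        rw [PySem.List.sorted_eq_foldl_insertBy, PySem.List.sorted_eq_foldl_insertBy,
          List.foldl_append, List.foldl_cons, List.foldl_nil]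
      have hpw : ((PySem.List.sorted M (fun x : Int × Int => x.1) false).take k.toNat).Pairwise
          (fun a b => a.1 ≤ b.1) :=
        List.Pairwise.sublist (List.take_sublist _ _) (PySem.List.sorted_pairwise M (fun x => x.1))
      have hstep : pvStep k ((PySem.List.sorted M (fun x => x.1) false).take k.toNat) x
          = (PySem.List.sorted (M ++ [x]) (fun x => x.1) false).take k.toNat := by
        rw [pvStep_eq_insertBy _ _ _ hpw, hsortM]
        set S := PySem.List.sorted M (fun t : Int × Int => t.1) false with hS
        set I := PySem.List.insertBy (fun a b : Int × Int => decide (a.1 < b.1)) x (S.take k.toNat) with hI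
        have hIlen : I.length = (S.take k.toNat).length + 1 := length_insertBy _ _
        have hIlen' : I.length ≤ k.toNat + 1 := by
          rw [hIlen, List.length_take]; omega
        by_cases hc : (I.length : Int) > k
        · rw [if_pos hc]
          have hIeq : I.length = k.toNat + 1 := by omega
          have : I.dropLast = I.take k.toNat := by
            rw [List.dropLast_eq_take, hIeq]
            simp
          rw [this, ← take_insertBy]
        · rw [if_neg hc]
          have : I.length ≤ k.toNat := by omega
          rw [← List.take_of_length_le this, ← take_insertBy]
      rw [hstep, ih (M ++ [x]), List.append_assoc]
      rfl

theorem foldB_neg (k : Int) (hk : k < 0) (f : Nat → Int × Int) (i : Nat) (L : List Nat) :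
    L.foldl (fun best j => if j == i then best else pvStep k best (f j)) [] = [] := by
  induction L with
  | nil => rfl
  | cons a L ih =>
      rw [List.foldl_cons]
      by_cases h : a = i
      · rw [if_pos (by simp [h])]; exact ih
      · rw [if_neg (by simp [h])]
        have : pvStep k [] (f a) = [] := by
          unfold pvStep
          show (if (((PySem.List.insert ([] : List (Int × Int)) ((0:Nat) : Int) (f a)).length : Int) > k)
                then _ else _) = _
          rw [PySem.List.insert_natCast ([] : List (Int × Int)) 0 (f a) (by simp)]
          simp only [List.take_nil, List.drop_nil, List.nil_append, List.length_cons,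
            List.length_nil]
          rw [if_pos (by omega)]
          rfl
        rw [this]
        exact ih

theorem rowB_eq_rowA (words : List String) (k : Int) (hk : 0 ≤ k) (i : Nat)
    (hi : i < words.length) :
    pvRowB (pvTop words) words.length k i = rowA words k (i : Int) := by
  unfold pvRowB rowA
  have hguard : (fun (best : List (Int × Int)) (j : Nat) =>
        if j == i then best else pvStep k best (pvDget (pvTop words) i j, (j : Int)))
      = (fun best j => if (decide (j ≠ i)) = true
          then pvStep k best (pvDget (pvTop words) i j, (j : Int)) else best) := by
    funext b j
    by_cases h : j = i <;> simp [h]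
  rw [hguard, ← List.foldl_filter, ← List.foldl_map (f := fun j : Nat => (pvDget (pvTop words) i j, (j : Int)))]
  have hcands : ((List.range words.length).filter (fun j => decide (j ≠ i))).map
        (fun j : Nat => (pvDget (pvTop words) i j, (j : Int))) = distsA words (i : Int) := by
    rw [distsA_eq words i hi]
  rw [hcands]
  have h0 : ([] : List (Int × Int)) = (PySem.List.sorted ([] : List (Int × Int)) (fun x => x.1) false).take k.toNat := by
    rw [show (PySem.List.sorted ([] : List (Int × Int)) (fun x => x.1) false) = [] from rfl,
      List.take_nil]
  rw [h0, foldB_eq_take_sorted k hk, List.nil_append, PySem.List.slice_to _ hk]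

-- for k < 0 with too few words, A's slice is empty as well
theorem length_sorted_distsA (words : List String) (i : Nat) (hi : i < words.length) :
    (PySem.List.sorted (distsA words (i : Int)) (fun x => x.1) false).length
      = words.length - 1 := by
  rw [PySem.List.length_sorted, distsA_eq words i hi, List.length_map]
  have hsplit := List.length_eq_countP_add_countP (p := fun j : Nat => decide (j ≠ i))
    (l := List.range words.length)
  have hone : List.countP (fun a => decide ¬(decide (a ≠ i) = true)) (List.range words.length) = 1 := by
    have hcc : List.countP (fun a => decide ¬(decide (a ≠ i) = true)) (List.range words.length)
        = (List.range words.length).count i := by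
      rw [List.count]
      apply List.countP_congr
      intro a _
      by_cases h : a = i <;> simp [h]
    rw [hcc]
    exact List.count_eq_one_of_mem List.nodup_range (List.mem_range.mpr hi)
  rw [← List.countP_eq_length_filter]
  simp only [List.length_range] at hsplit
  omega

theorem rowA_neg_empty (words : List String) (k : Int) (hk : k < 0)
    (hsmall : (words.length : Int) + k ≤ 1) (i : Nat) (hi : i < words.length) :
    rowA words k (i : Int) = [] := by
  unfold rowA
  obtain ⟨m, hm, hmpos⟩ : ∃ m : Nat, k = -(m : Int) ∧ 0 < m := ⟨(-k).toNat, by omega, by omega⟩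
  rw [hm, PySem.List.slice_to_neg_natCast _ m hmpos]
  have hlen := length_sorted_distsA words i hi
  have : (PySem.List.sorted (distsA words (i : Int)) (fun x => x.1) false).length - m = 0 := by
    omega
  rw [this]
  simp

theorem rowA_neg_length (words : List String) (k : Int) (hk : k < 0)
    (hbig : 2 ≤ (words.length : Int) + k) (i : Nat) (hi : i < words.length) :
    rowA words k (i : Int) ≠ [] := by
  unfold rowA
  obtain ⟨m, hm, hmpos⟩ : ∃ m : Nat, k = -(m : Int) ∧ 0 < m := ⟨(-k).toNat, by omega, by omega⟩
  rw [hm, PySem.List.slice_to_neg_natCast _ m hmpos]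
  intro hnil
  have hlen := length_sorted_distsA words i hi
  have := congrArg List.length hnil
  simp only [List.length_map, List.length_take, List.length_nil] at this
  omega

theorem main_tight (words : List String) (k : Int) (hk : k < 0)
    (hbig : 2 ≤ (words.length : Int) + k) :
    build_knn_graph words k ≠ build_knn_graph_alt words k := by
  intro heq
  rw [buildA_items] at heq
  unfold build_knn_graph_alt at heq
  have h0 : 0 < words.length := by omega
  have h00 := congrArg (fun l : List (Int × List (Int × Int)) => l[0]?) heq
  simp only [List.getElem?_map, List.getElem?_range h0] at h00
  have hrow : rowA words k ((0 : Nat) : Int) = pvRowB (pvTop words) words.length k 0 := by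
    have := h00
    simp only [Option.map_some] at this
    exact congrArg Prod.snd (Option.some.inj this)
  have hempty : pvRowB (pvTop words) words.length k 0 = [] := by
    unfold pvRowB
    rw [foldB_neg k hk]
    rfl
  exact rowA_neg_length words k hk hbig 0 h0 (hrow.trans hempty)

theorem main_eq (words : List String) (k : Int) (hnd : ¬ D_build_knn_graph words k) :
    build_knn_graph words k = build_knn_graph_alt words k := by
  rw [buildA_items]
  unfold build_knn_graph_alt
  apply List.map_congr_left
  intro i hi
  have hi' : i < words.length := List.mem_range.mp hi
  by_cases hk : 0 ≤ k
  · rw [rowB_eq_rowA words k hk i hi']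
  · have hk' : k < 0 := by omega
    have hsmall : (words.length : Int) + k ≤ 1 := by
      unfold D_build_knn_graph at hnd
      omega
    rw [rowA_neg_empty words k hk' hsmall i hi']
    unfold pvRowB
    rw [foldB_neg k hk']
    rfl

-- ===== VERDICT (by name: the statement is the Claim_ definition above) =====
theorem build_knn_graph_spec : Claim_unchanged_build_knn_graph := by
  intro words k _ hnd
  show build_knn_graph words k = build_knn_graph_alt words k
  exact main_eq words k hnd

theorem build_knn_graph_changed : Claim_changed_build_knn_graph := by
  unfold Claim_changed_build_knn_graph
  refine ⟨by decide, by decide, by decide, by decide, by decide⟩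

theorem build_knn_graph_tight : Claim_exact_build_knn_graph := by
  intro words k _ hD
  exact main_tight words k hD.1 hD.2
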